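-- pv_equiv track=rewrite | github.com/TakaIshikawa/blueprint | src/blueprint/audits/critical_path.py | _best_dependency
-- ===== SOURCE A (Python) =====
-- def _best_dependency(
--     dependencies: list[str],
--     best_weight: dict[str, int],
-- ) -> str | None:
--     best_dependency = None
--     for dependency_id in dependencies:
--         if best_dependency is None:
--             best_dependency = dependency_id
--         elif best_weight[dependency_id] > best_weight[best_dependency]:
--             best_dependency = dependency_id
--     return best_dependency
-- ===== SOURCE B (Python) =====
-- def _best_dependency(
--     dependencies: list[str],
--     best_weight: dict[str, int],
-- ) -> str | None:
--     # Two passes: find the maximum weight, then the first dependency achieving it.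
--     max_w = max((best_weight[d] for d in dependencies), default=None)
--     if max_w is None:
--         return None
--     return next(d for d in dependencies if best_weight[d] == max_w)
-- ===== Notes on version B (the rewrite author's own statement) =====
-- stated objective: alternative
-- what changed: Replaces A's single running-argmax fold with two differently-shaped passes: first compute the maximum weight, then return the first dependency whose weight equals it (same first-wins tie-breaking).
-- outside the precondition, e.g. on _best_dependency(['x'], {}): A returns 'x', B raises KeyError
import Mathlib
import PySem

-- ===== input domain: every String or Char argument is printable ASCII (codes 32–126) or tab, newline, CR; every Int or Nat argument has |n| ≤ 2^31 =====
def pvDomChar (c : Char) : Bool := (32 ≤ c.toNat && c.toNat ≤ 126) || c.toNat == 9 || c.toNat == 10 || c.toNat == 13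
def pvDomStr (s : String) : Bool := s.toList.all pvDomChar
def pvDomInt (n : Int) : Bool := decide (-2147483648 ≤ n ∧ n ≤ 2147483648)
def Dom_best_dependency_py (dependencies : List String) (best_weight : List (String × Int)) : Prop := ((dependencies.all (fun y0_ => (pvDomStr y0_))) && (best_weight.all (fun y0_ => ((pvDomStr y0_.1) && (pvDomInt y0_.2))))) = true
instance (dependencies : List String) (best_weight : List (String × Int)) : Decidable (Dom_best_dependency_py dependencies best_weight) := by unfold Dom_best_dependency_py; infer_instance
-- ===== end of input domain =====

-- B replaces A's single running-argmax fold with two passes (max weight, then first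
-- dependency achieving it); objective: alternative decomposition, same cost.

-- ===== PORT A =====
-- A: one fold carrying the best dependency so far; first wins on ties (strict >).
def best_dependency_py (dependencies : List String) (best_weight : List (String × Int)) : Option String :=
  let d := PySem.Dict.ofList best_weight
  dependencies.foldl
    (fun best dep =>
      match best with
      | none => some dep
      | some b => if d.getD dep 0 > d.getD b 0 then some dep else some b)
    none

-- ===== PORT B =====
-- B: pass 1 computes the maximum weight (none on empty), pass 2 finds the first
-- dependency whose weight equals it.
def best_dependency_py_alt (dependencies : List String) (best_weight : List (String × Int)) : Option String :=
  let d := PySem.Dict.ofList best_weight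
  match PySem.List.max? (dependencies.map (fun dep => d.getD dep 0)) (fun w => w) with
  | none => none
  | some m => dependencies.find? (fun dep => d.getD dep 0 == m)

-- ===== PRECONDITION & SPEC =====
-- Pre_ excludes inputs where some dependency is missing from best_weight: Python A raises
-- KeyError there whenever len(dependencies) ≥ 2, and B raises KeyError already for a
-- singleton (the one excluded case where A still returns: see claim.json cites).
def Pre_best_dependency_py (dependencies : List String) (best_weight : List (String × Int)) : Prop :=
  dependencies.all (fun dep => (PySem.Dict.ofList best_weight).contains dep) = true
instance (dependencies : List String) (best_weight : List (String × Int)) : Decidable (Pre_best_dependency_py dependencies best_weight) := by unfold Pre_best_dependency_py; infer_instance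

def pvWitness_best_dependency_py : List String × (List (String × Int)) :=
  (["a", "b", "c"], [("a", 2), ("b", 5), ("c", 5)])

def Spec_best_dependency_py (dependencies : List String) (best_weight : List (String × Int)) (out : Option String) : Prop := out = best_dependency_py_alt dependencies best_weight
instance (dependencies : List String) (best_weight : List (String × Int)) (out : Option String) : Decidable (Spec_best_dependency_py dependencies best_weight out) := by unfold Spec_best_dependency_py; infer_instance

-- ===== CLAIM (what is proved, stated in full; the proofs are below) =====
def Claim_equal_best_dependency_py : Prop := ∀ (dependencies : List String) (best_weight : List (String × Int)), Dom_best_dependency_py dependencies best_weight → Pre_best_dependency_py dependencies best_weight → Spec_best_dependency_py dependencies best_weight (best_dependency_py dependencies best_weight)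

-- ===== LEMMAS AND PROOFS =====

-- A's fold with seed `some x` over t returns the first element of x :: t whose weight
-- equals the running maximum of the weights of x :: t.
theorem fold_eq_find (f : String → Int) :
    ∀ (t : List String) (x : String),
      t.foldl
        (fun best dep =>
          match best with
          | none => some dep
          | some b => if f dep > f b then some dep else some b)
        (some x)
      = (x :: t).find? (fun dep => f dep == (t.map f).foldl max (f x)) := by
  intro t
  induction t with
  | nil => intro x; simp
  | cons y t' ih =>
    intro x
    simp only [List.foldl_cons, List.map_cons]
    by_cases h : f y > f x
    · have hmax : max (f x) (f y) = f y := max_eq_right (le_of_lt h)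
      have hx : f x < (t'.map f).foldl max (f y) :=
        lt_of_lt_of_le h (PySem.List.le_foldl_max _ _).1
      rw [if_pos h, ih y]
      have hne : (f x == (t'.map f).foldl max (f y)) = false := by
        simp only [beq_eq_false_iff_ne]; omega
      simp only [List.find?_cons, hmax, hne]
    · have hmax : max (f x) (f y) = f x := max_eq_left (by omega)
      rw [if_neg h, ih x]
      -- compare the two find?s over x :: y :: t' vs x :: t'
      by_cases hx : f x = (t'.map f).foldl max (f x)
      · simp only [List.find?_cons, hmax, ← hx, beq_self_eq_true]
      · have hxlt : f x < (t'.map f).foldl max (f x) :=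
          lt_of_le_of_ne (PySem.List.le_foldl_max _ _).1 hx
        have hyne : (f y == (t'.map f).foldl max (f x)) = false := by
          simp only [beq_eq_false_iff_ne]; omega
        have hxne : (f x == (t'.map f).foldl max (f x)) = false := by
          simp only [beq_eq_false_iff_ne]; omega
        simp only [List.find?_cons, hmax, hxne, hyne]

theorem equal_aux (f : String → Int) (deps : List String) :
    deps.foldl
      (fun best dep =>
        match best with
        | none => some dep
        | some b => if f dep > f b then some dep else some b)
      none
    = match PySem.List.max? (deps.map f) (fun w => w) with
      | none => none
      | some m => deps.find? (fun dep => f dep == m) := by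
  cases deps with
  | nil => simp [PySem.List.max?]
  | cons x t =>
    rw [List.map_cons, PySem.List.max?_id_cons, List.foldl_cons]
    exact fold_eq_find f t x

-- ===== VERDICT (by name: the statement is the Claim_ definition above) =====
theorem best_dependency_py_spec : Claim_equal_best_dependency_py := by
  intro deps bw _ _
  unfold Spec_best_dependency_py best_dependency_py best_dependency_py_alt
  exact equal_aux (fun dep => (PySem.Dict.ofList bw).getD dep 0) deps
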